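-- pv_equiv track=rewrite | github.com/mhold3n/Larrick_multi | src/larrak2/simulation_validation/cantera_mechanisms.py | _sanitize_llnl_thermo_lines
-- ===== SOURCE A (Python) =====
-- EXCLUDED_SPECIES = {"C5H81OOH4-5O2", "C5H81OOH5-4O2"}
--
-- def _sanitize_llnl_thermo_lines(lines: list[str]) -> list[str]:
--     sanitized: list[str] = []
--     in_block = False
--     block_line = 0
--     skip_block = False
--
--     for raw_line in lines:
--         line = raw_line.rstrip("\n")
--         stripped = line.strip()
--
--         if not in_block:
--             if stripped and not stripped.startswith("!") and stripped[-1:] == "1":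
--                 in_block = True
--                 block_line = 1
--                 species_name = stripped.split()[0]
--                 skip_block = species_name in EXCLUDED_SPECIES
--                 if skip_block:
--                     continue
--             sanitized.append(line + "\n")
--             continue
--
--         block_line += 1
--         if skip_block:
--             if block_line >= 4:
--                 in_block = False
--                 block_line = 0
--                 skip_block = False
--             continue
--         if block_line == 4 and stripped and not stripped.startswith("!") and stripped[-1:] != "4":
--             line = line.rstrip() + "                   4"
--         sanitized.append(line + "\n")
--
--         if block_line >= 4:
--             in_block = False
--             block_line = 0
--             skip_block = False
--
--     return sanitized
-- ===== SOURCE B (Python) =====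
-- EXCLUDED_SPECIES = {"C5H81OOH4-5O2", "C5H81OOH5-4O2"}
--
-- def _sanitize_llnl_thermo_lines(lines: list[str]) -> list[str]:
--     out: list[str] = []
--     i = 0
--     n = len(lines)
--     while i < n:
--         line = lines[i].rstrip("\n")
--         stripped = line.strip()
--         if stripped and not stripped.startswith("!") and stripped.endswith("1"):
--             # start of a 4-line thermo record: consume it as a chunk
--             if stripped.split()[0] in EXCLUDED_SPECIES:
--                 i += 4
--                 continue
--             block = [raw.rstrip("\n") for raw in lines[i:i + 4]]
--             if len(block) == 4:
--                 last = block[3]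
--                 s4 = last.strip()
--                 if s4 and not s4.startswith("!") and not s4.endswith("4"):
--                     block[3] = last.rstrip() + "                   4"
--             out.extend(b + "\n" for b in block)
--             i += 4
--         else:
--             out.append(line + "\n")
--             i += 1
--     return out
-- ===== Notes on version B (the rewrite author's own statement) =====
-- stated objective: simpler
-- what changed: Replaces A's per-line state machine threading in_block/block_line/skip_block flags with an index-based while-loop that consumes each 4-line thermo record as one chunk (slice, patch the 4th line, emit), so no cross-line state survives between iterations.
import Mathlib
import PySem

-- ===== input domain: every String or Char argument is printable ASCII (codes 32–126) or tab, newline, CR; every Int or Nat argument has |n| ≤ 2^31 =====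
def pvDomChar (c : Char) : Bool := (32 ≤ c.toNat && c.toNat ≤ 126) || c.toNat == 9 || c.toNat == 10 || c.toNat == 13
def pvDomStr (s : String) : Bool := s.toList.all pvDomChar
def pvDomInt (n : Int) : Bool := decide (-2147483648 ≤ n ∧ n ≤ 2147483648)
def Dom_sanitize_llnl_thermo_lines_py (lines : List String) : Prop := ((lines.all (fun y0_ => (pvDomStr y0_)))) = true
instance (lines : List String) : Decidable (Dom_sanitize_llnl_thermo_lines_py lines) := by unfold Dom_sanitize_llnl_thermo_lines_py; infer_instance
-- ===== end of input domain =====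

-- B re-decomposes A's per-line in_block/block_line/skip_block state machine into an
-- index-free chunk consumer that takes each 4-line record at once (objective: simpler).

-- shared primitive: Python's  s.rstrip("\n")  (PySem has no chars-argument rstrip);
-- exact: removes exactly the trailing '\n' characters
def pvRstripNl (s : String) : String :=
  String.ofList ((s.toList.reverse.dropWhile (· == '\n')).reverse)

-- the module constant EXCLUDED_SPECIES (a Python set literal)
def pvExcluded : PySem.Set String :=
  PySem.Set.ofList ["C5H81OOH4-5O2", "C5H81OOH5-4O2"]

-- ===== PORT A =====
-- literal port of A's for-loop: structural recursion threading (in_block, block_line, skip_block);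
-- stripped[-1:] == "1" is ported as the slice it is; stripped.split()[0] is guarded by stripped ≠ ""
def sanitizeALoop : List String → Bool → Int → Bool → List String
  | [], _, _, _ => []
  | rawLine :: rest, in_block, block_line, skip_block =>
    let line := pvRstripNl rawLine
    let stripped := PySem.Str.strip line
    if in_block = false then
      if stripped ≠ "" ∧ PySem.Str.startswith stripped "!" = false ∧
          PySem.List.slice stripped.toList (some (-1)) none = ['1'] then
        let species_name := (PySem.Str.split₀ stripped).headD ""
        if species_name ∈ pvExcluded then
          sanitizeALoop rest true 1 true
        else
          (line ++ "\n") :: sanitizeALoop rest true 1 false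
      else
        (line ++ "\n") :: sanitizeALoop rest false block_line skip_block
    else
      let bl := block_line + 1
      if skip_block then
        if bl ≥ 4 then sanitizeALoop rest false 0 false
        else sanitizeALoop rest true bl true
      else
        let line2 :=
          if bl = 4 ∧ stripped ≠ "" ∧ PySem.Str.startswith stripped "!" = false ∧
              PySem.List.slice stripped.toList (some (-1)) none ≠ ['4'] then
            PySem.Str.rstrip line ++ "                   4"
          else line
        (line2 ++ "\n") ::
          (if bl ≥ 4 then sanitizeALoop rest false 0 false
           else sanitizeALoop rest true bl skip_block)

def sanitize_llnl_thermo_lines_py (lines : List String) : List String :=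
  sanitizeALoop lines false 0 false

-- ===== PORT B =====
-- literal port of Source B's while-loop over the index i: recursion on the remaining suffix lines[i:],
-- consuming a whole 4-line record (lines[i:i+4]) per step
def sanitizeBLoop : List String → List String
  | [] => []
  | rawLine :: rest =>
    let line := pvRstripNl rawLine
    let stripped := PySem.Str.strip line
    if stripped ≠ "" ∧ PySem.Str.startswith stripped "!" = false ∧
        PySem.Str.endswith stripped "1" = true then
      if (PySem.Str.split₀ stripped).headD "" ∈ pvExcluded then
        sanitizeBLoop (rest.drop 3)
      else
        let block := (rawLine :: rest.take 3).map pvRstripNl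
        let block2 :=
          if block.length = 4 then
            let last := block.getD 3 ""
            let s4 := PySem.Str.strip last
            if s4 ≠ "" ∧ PySem.Str.startswith s4 "!" = false ∧
                PySem.Str.endswith s4 "4" = false then
              block.set 3 (PySem.Str.rstrip last ++ "                   4")
            else block
          else block
        block2.map (· ++ "\n") ++ sanitizeBLoop (rest.drop 3)
    else
      (line ++ "\n") :: sanitizeBLoop rest
termination_by ls => ls.length
decreasing_by all_goals simp

def sanitize_llnl_thermo_lines_py_alt (lines : List String) : List String :=
  sanitizeBLoop lines

-- ===== PRECONDITION & SPEC =====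
def Spec_sanitize_llnl_thermo_lines_py (lines : List String) (out : List String) : Prop := out = sanitize_llnl_thermo_lines_py_alt lines
instance (lines : List String) (out : List String) : Decidable (Spec_sanitize_llnl_thermo_lines_py lines out) := by unfold Spec_sanitize_llnl_thermo_lines_py; infer_instance

-- ===== CLAIM (what is proved, stated in full; the proofs are below) =====
def Claim_equal_sanitize_llnl_thermo_lines_py : Prop := ∀ (lines : List String), Dom_sanitize_llnl_thermo_lines_py lines → Spec_sanitize_llnl_thermo_lines_py lines (sanitize_llnl_thermo_lines_py lines)

-- ===== LEMMAS AND PROOFS =====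

-- A's  stripped[-1:] == c  is B's  stripped.endswith(c)
theorem slice_last_eq_endswith (cs : List Char) (c : Char) :
    (PySem.List.slice cs (some (-1)) none = [c]) ↔ PySem.Chars.endswith cs [c] = true := by
  rw [PySem.List.slice_from_neg_one, PySem.Chars.endswith_iff]
  induction cs with
  | nil => simp
  | cons a t ih =>
    rcases t with _ | ⟨b, u⟩
    · simp [List.suffix_cons_iff, eq_comm]
    · simpa [List.suffix_cons_iff] using ih

theorem endswith_one (st : String) :
    (PySem.List.slice st.toList (some (-1)) none = ['1']) ↔
      PySem.Str.endswith st "1" = true := by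
  rw [slice_last_eq_endswith]; simp

theorem endswith_four (st : String) :
    (PySem.List.slice st.toList (some (-1)) none = ['4']) ↔
      PySem.Str.endswith st "4" = true := by
  rw [slice_last_eq_endswith]; simp

-- one-step unfoldings of the two loops (rfl lemmas; used to drive the computation)
theorem aLoop_nil (ib : Bool) (bl : Int) (sk : Bool) :
    sanitizeALoop [] ib bl sk = [] := rfl

theorem aLoop_cons_out (raw : String) (rest : List String) (bl : Int) (sk : Bool) :
    sanitizeALoop (raw :: rest) false bl sk =
      (if PySem.Str.strip (pvRstripNl raw) ≠ "" ∧
          PySem.Str.startswith (PySem.Str.strip (pvRstripNl raw)) "!" = false ∧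
          PySem.List.slice (PySem.Str.strip (pvRstripNl raw)).toList (some (-1)) none = ['1'] then
        if (PySem.Str.split₀ (PySem.Str.strip (pvRstripNl raw))).headD "" ∈ pvExcluded then
          sanitizeALoop rest true 1 true
        else (pvRstripNl raw ++ "\n") :: sanitizeALoop rest true 1 false
      else (pvRstripNl raw ++ "\n") :: sanitizeALoop rest false bl sk) := by
  rw [sanitizeALoop, if_pos rfl]

theorem aLoop_skip2 (raw : String) (rest : List String) :
    sanitizeALoop (raw :: rest) true 1 true = sanitizeALoop rest true (1 + 1) true := by
  rw [sanitizeALoop]; norm_num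

theorem aLoop_skip3 (raw : String) (rest : List String) :
    sanitizeALoop (raw :: rest) true (1 + 1) true = sanitizeALoop rest true (1 + 1 + 1) true := by
  rw [sanitizeALoop]; norm_num

theorem aLoop_skip4 (raw : String) (rest : List String) :
    sanitizeALoop (raw :: rest) true (1 + 1 + 1) true = sanitizeALoop rest false 0 false := by
  rw [sanitizeALoop]; norm_num

theorem aLoop_step2 (raw : String) (rest : List String) :
    sanitizeALoop (raw :: rest) true 1 false =
      (pvRstripNl raw ++ "\n") :: sanitizeALoop rest true (1 + 1) false := by
  rw [sanitizeALoop]; norm_num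

theorem aLoop_step3 (raw : String) (rest : List String) :
    sanitizeALoop (raw :: rest) true (1 + 1) false =
      (pvRstripNl raw ++ "\n") :: sanitizeALoop rest true (1 + 1 + 1) false := by
  rw [sanitizeALoop]; norm_num

theorem aLoop_step4 (raw : String) (rest : List String) :
    sanitizeALoop (raw :: rest) true (1 + 1 + 1) false =
      ((if PySem.Str.strip (pvRstripNl raw) ≠ "" ∧
            PySem.Str.startswith (PySem.Str.strip (pvRstripNl raw)) "!" = false ∧
            PySem.List.slice (PySem.Str.strip (pvRstripNl raw)).toList (some (-1)) none ≠ ['4'] then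
          PySem.Str.rstrip (pvRstripNl raw) ++ "                   4"
        else pvRstripNl raw) ++ "\n") :: sanitizeALoop rest false 0 false := by
  rw [sanitizeALoop]; norm_num

theorem bLoop_nil : sanitizeBLoop [] = [] := by rw [sanitizeBLoop]

theorem bLoop_cons (raw : String) (rest : List String) :
    sanitizeBLoop (raw :: rest) =
      (if PySem.Str.strip (pvRstripNl raw) ≠ "" ∧
          PySem.Str.startswith (PySem.Str.strip (pvRstripNl raw)) "!" = false ∧
          PySem.Str.endswith (PySem.Str.strip (pvRstripNl raw)) "1" = true then
        if (PySem.Str.split₀ (PySem.Str.strip (pvRstripNl raw))).headD "" ∈ pvExcluded then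
          sanitizeBLoop (rest.drop 3)
        else
          (if ((raw :: rest.take 3).map pvRstripNl).length = 4 then
            if PySem.Str.strip (((raw :: rest.take 3).map pvRstripNl).getD 3 "") ≠ "" ∧
                PySem.Str.startswith (PySem.Str.strip (((raw :: rest.take 3).map pvRstripNl).getD 3 "")) "!" = false ∧
                PySem.Str.endswith (PySem.Str.strip (((raw :: rest.take 3).map pvRstripNl).getD 3 "")) "4" = false then
              ((raw :: rest.take 3).map pvRstripNl).set 3
                (PySem.Str.rstrip (((raw :: rest.take 3).map pvRstripNl).getD 3 "") ++ "                   4")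
            else (raw :: rest.take 3).map pvRstripNl
          else (raw :: rest.take 3).map pvRstripNl).map (· ++ "\n") ++ sanitizeBLoop (rest.drop 3)
      else (pvRstripNl raw ++ "\n") :: sanitizeBLoop rest) := by
  rw [sanitizeBLoop]

theorem key_lemma (n : Nat) : ∀ ls : List String, ls.length ≤ n →
    ∀ bl sk, sanitizeALoop ls false bl sk = sanitizeBLoop ls := by
  induction n with
  | zero =>
    intro ls h bl sk
    have : ls = [] := List.eq_nil_of_length_eq_zero (Nat.le_zero.mp h)
    subst this
    rw [aLoop_nil, bLoop_nil]
  | succ n ih =>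
    intro ls hlen bl sk
    match ls with
    | [] => rw [aLoop_nil, bLoop_nil]
    | rawLine :: rest =>
      have hr : rest.length ≤ n := by simpa using Nat.lt_succ_iff.mp (by simpa using hlen)
      rw [aLoop_cons_out, bLoop_cons]
      by_cases hstart : PySem.Str.strip (pvRstripNl rawLine) ≠ "" ∧
          PySem.Str.startswith (PySem.Str.strip (pvRstripNl rawLine)) "!" = false ∧
          PySem.Str.endswith (PySem.Str.strip (pvRstripNl rawLine)) "1" = true
      case neg =>
        have hA : ¬ (PySem.Str.strip (pvRstripNl rawLine) ≠ "" ∧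
            PySem.Str.startswith (PySem.Str.strip (pvRstripNl rawLine)) "!" = false ∧
            PySem.List.slice (PySem.Str.strip (pvRstripNl rawLine)).toList (some (-1)) none = ['1']) :=
          fun ⟨x, y, z⟩ => hstart ⟨x, y, (endswith_one _).mp z⟩
        rw [if_neg hA, if_neg hstart]
        exact congrArg _ (ih rest hr bl sk)
      case pos =>
        have hA : PySem.Str.strip (pvRstripNl rawLine) ≠ "" ∧
            PySem.Str.startswith (PySem.Str.strip (pvRstripNl rawLine)) "!" = false ∧
            PySem.List.slice (PySem.Str.strip (pvRstripNl rawLine)).toList (some (-1)) none = ['1'] :=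
          ⟨hstart.1, hstart.2.1, (endswith_one _).mpr hstart.2.2⟩
        rw [if_pos hA, if_pos hstart]
        by_cases hskip : (PySem.Str.split₀ (PySem.Str.strip (pvRstripNl rawLine))).headD "" ∈ pvExcluded
        case pos =>
          rw [if_pos hskip, if_pos hskip]
          -- A skips the remaining (up to) three lines of the record; B drops them
          rcases rest with _ | ⟨a, _ | ⟨b, _ | ⟨c, t⟩⟩⟩
          · rw [aLoop_nil, List.drop_nil, bLoop_nil]
          · rw [aLoop_skip2, aLoop_nil]
            rw [show List.drop 3 [a] = ([] : List String) from rfl, bLoop_nil]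
          · rw [aLoop_skip2, aLoop_skip3, aLoop_nil]
            rw [show List.drop 3 [a, b] = ([] : List String) from rfl, bLoop_nil]
          · rw [aLoop_skip2, aLoop_skip3, aLoop_skip4]
            have ht : t.length ≤ n := by
              refine le_trans ?_ hr; simp; omega
            rw [show List.drop 3 (a :: b :: c :: t) = t from rfl]
            exact ih t ht 0 false
        case neg =>
          rw [if_neg hskip, if_neg hskip]
          rcases rest with _ | ⟨a, _ | ⟨b, _ | ⟨c, t⟩⟩⟩
          · simp only [List.take_nil, List.map, List.length, List.drop_nil]
            rw [if_neg (by norm_num), aLoop_nil, bLoop_nil]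
            simp
          · simp only [List.take, List.map, List.length]
            rw [if_neg (by norm_num)]
            rw [aLoop_step2, aLoop_nil]
            rw [show List.drop 3 [a] = ([] : List String) from rfl, bLoop_nil]
            simp
          · simp only [List.take, List.map, List.length]
            rw [if_neg (by norm_num)]
            rw [aLoop_step2, aLoop_step3, aLoop_nil]
            rw [show List.drop 3 [a, b] = ([] : List String) from rfl, bLoop_nil]
            simp
          · have ht : t.length ≤ n := by
              refine le_trans ?_ hr; simp; omega
            simp only [List.take, List.map, List.length, List.getD, List.getElem?_cons_succ,
              List.getElem?_cons_zero, Option.getD_some]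
            rw [if_pos trivial]
            rw [aLoop_step2, aLoop_step3, aLoop_step4]
            rw [show List.drop 3 (a :: b :: c :: t) = t from rfl]
            by_cases hp : PySem.Str.strip (pvRstripNl c) ≠ "" ∧
                PySem.Str.startswith (PySem.Str.strip (pvRstripNl c)) "!" = false ∧
                PySem.Str.endswith (PySem.Str.strip (pvRstripNl c)) "4" = false
            · have hpA : (PySem.Str.strip (pvRstripNl c) ≠ "" ∧
                  PySem.Str.startswith (PySem.Str.strip (pvRstripNl c)) "!" = false ∧
                  PySem.List.slice (PySem.Str.strip (pvRstripNl c)).toList (some (-1)) none ≠ ['4']) :=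
                ⟨hp.1, hp.2.1,
                  fun z => by rw [(endswith_four _).mp z] at hp; exact absurd hp.2.2 (by simp)⟩
              rw [if_pos hpA, if_pos hp]
              simp only [List.set, List.map, List.cons_append, List.nil_append]
              rw [ih t ht 0 false]
            · have hpA : ¬ (PySem.Str.strip (pvRstripNl c) ≠ "" ∧
                  PySem.Str.startswith (PySem.Str.strip (pvRstripNl c)) "!" = false ∧
                  PySem.List.slice (PySem.Str.strip (pvRstripNl c)).toList (some (-1)) none ≠ ['4']) := by
                rintro ⟨x, y, z⟩
                refine hp ⟨x, y, ?_⟩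
                rcases Bool.eq_false_or_eq_true (PySem.Str.endswith (PySem.Str.strip (pvRstripNl c)) "4") with h | h
                · exact absurd ((endswith_four _).mpr h) z
                · exact h
              rw [if_neg hpA, if_neg hp]
              simp only [List.map, List.cons_append, List.nil_append]
              rw [ih t ht 0 false]

-- ===== VERDICT (by name: the statement is the Claim_ definition above) =====
theorem sanitize_llnl_thermo_lines_py_spec : Claim_equal_sanitize_llnl_thermo_lines_py := by
  intro lines _
  unfold Spec_sanitize_llnl_thermo_lines_py sanitize_llnl_thermo_lines_py sanitize_llnl_thermo_lines_py_alt
  exact key_lemma lines.length lines le_rfl 0 false
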